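-- pv_equiv track=rewrite | github.com/CaronLab/MhcVizPipe | MhcVizPipe/Tools/netmhcpan_helper.py | create_netmhcpan_peptide_index
-- ===== SOURCE A (Python) =====
-- common_aa = "ARNDCQEGHILKMFPSTWYV"
--
-- def replace_uncommon_aas(peptide):
--     pep = peptide
--     for aa in peptide:
--         if aa not in common_aa:
--             pep = pep.replace(aa, 'X')
--     return pep
--
-- def create_netmhcpan_peptide_index(peptide_list):
--     netmhcpan_peps = {}
--     for i in range(len(peptide_list)):
--         if len(peptide_list[i]) < 1:
--             continue
--         netmhc_pep = replace_uncommon_aas(peptide_list[i])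
--         netmhcpan_peps[peptide_list[i]] = netmhc_pep
--     return netmhcpan_peps
-- ===== SOURCE B (Python) =====
-- common_aa = "ARNDCQEGHILKMFPSTWYV"
--
-- def create_netmhcpan_peptide_index(peptide_list):
--     common = frozenset(common_aa)
--     return {pep: ''.join(c if c in common else 'X' for c in pep)
--             for pep in peptide_list if pep}
-- ===== Notes on version B (the rewrite author's own statement) =====
-- stated objective: simpler
-- what changed: Replaced the per-uncommon-character full-string str.replace loop with a single character-level pass over each peptide against a precomputed frozenset, and built the result as one dict comprehension that skips empty peptides.
import Mathlib
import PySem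

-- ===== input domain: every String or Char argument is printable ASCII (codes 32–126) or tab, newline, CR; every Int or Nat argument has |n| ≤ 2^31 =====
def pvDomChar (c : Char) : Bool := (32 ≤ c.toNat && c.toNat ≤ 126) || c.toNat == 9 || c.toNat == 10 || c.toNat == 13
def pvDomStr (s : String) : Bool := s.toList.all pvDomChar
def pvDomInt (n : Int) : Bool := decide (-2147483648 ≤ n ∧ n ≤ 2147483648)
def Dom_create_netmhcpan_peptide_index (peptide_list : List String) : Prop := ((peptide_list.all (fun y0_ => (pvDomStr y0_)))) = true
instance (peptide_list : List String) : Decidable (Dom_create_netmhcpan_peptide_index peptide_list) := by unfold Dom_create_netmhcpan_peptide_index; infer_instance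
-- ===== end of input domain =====

-- B replaces A's repeated full-string str.replace per uncommon character with one
-- character-level pass per peptide (precomputed common-AA set) and a dict
-- comprehension that skips empty peptides; simpler, same measured cost.


-- ===== PORT A =====
def common_aa : String := "ARNDCQEGHILKMFPSTWYV"

-- for aa in peptide: if aa not in common_aa: pep = pep.replace(aa, 'X')
def replace_uncommon_aas (peptide : String) : String :=
  peptide.toList.foldl
    (fun pep aa =>
      if PySem.Str.isIn (String.singleton aa) common_aa then pep
      else PySem.Str.replace pep (String.singleton aa) "X")
    peptide

def create_netmhcpan_peptide_index (peptide_list : List String) : List (String × String) :=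
  (peptide_list.foldl
    (fun d p =>
      if p.toList.length < 1 then d
      else d.insert p (replace_uncommon_aas p))
    (PySem.Dict.empty : PySem.Dict String String)).items

-- ===== PORT B =====
def commonSet : PySem.Set Char := PySem.Set.ofList common_aa.toList

-- ''.join(c if c in common else 'X' for c in pep)
def cleanPeptide (pep : String) : String :=
  String.ofList (pep.toList.map (fun c => if commonSet.contains c then c else 'X'))

-- {pep: clean(pep) for pep in peptide_list if pep}
def create_netmhcpan_peptide_index_alt (peptide_list : List String) : List (String × String) :=
  ((peptide_list.filter (fun p => !p.toList.isEmpty)).foldl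
    (fun d p => d.insert p (cleanPeptide p))
    (PySem.Dict.empty : PySem.Dict String String)).items

-- ===== PRECONDITION & SPEC =====
def Spec_create_netmhcpan_peptide_index (peptide_list : List String) (out : List (String × String)) : Prop := out = create_netmhcpan_peptide_index_alt peptide_list
instance (peptide_list : List String) (out : List (String × String)) : Decidable (Spec_create_netmhcpan_peptide_index peptide_list out) := by unfold Spec_create_netmhcpan_peptide_index; infer_instance

-- ===== CLAIM (what is proved, stated in full; the proofs are below) =====
def Claim_equal_create_netmhcpan_peptide_index : Prop := ∀ (peptide_list : List String), Dom_create_netmhcpan_peptide_index peptide_list → Spec_create_netmhcpan_peptide_index peptide_list (create_netmhcpan_peptide_index peptide_list)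

-- ===== LEMMAS AND PROOFS =====

-- membership of one char as a substring
theorem singleton_infix_iff (c : Char) (l : List Char) : [c] <:+: l ↔ c ∈ l := by
  constructor
  · intro h; exact h.subset (List.mem_singleton_self c)
  · intro h
    obtain ⟨s, t, rfl⟩ := List.append_of_mem h
    exact ⟨s, t, by simp⟩

-- aa in common_aa (string membership) agrees with B's set membership
theorem inCommon_eq (c : Char) :
    PySem.Str.isIn (String.singleton c) common_aa = commonSet.contains c := by
  rw [Bool.eq_iff_iff, PySem.Str.isIn_iff_infix]
  simp [singleton_infix_iff, commonSet, PySem.Set.mem_ofList]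

-- single-character str.replace is a character map
theorem replace_go_single (a : Char) :
    ∀ (fuel : Nat) (l acc : List Char), l.length ≤ fuel →
      PySem.Chars.replace.go [a] ['X'] fuel l acc
        = acc.reverse ++ l.map (fun c => if c = a then 'X' else c) := by
  intro fuel
  induction fuel with
  | zero =>
    intro l acc h
    have : l = [] := List.eq_nil_of_length_eq_zero (Nat.le_zero.mp h)
    subst this
    simp [PySem.Chars.replace.go]
  | succ n ih =>
    intro l acc h
    cases l with
    | nil => simp [PySem.Chars.replace.go]
    | cons c t =>
      have h' : t.length ≤ n := by simpa using Nat.le_of_succ_le_succ h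
      simp only [PySem.Chars.replace.go]
      by_cases hc : c = a
      · subst hc
        have hp : List.isPrefixOf [c] (c :: t) = true := by simp [List.isPrefixOf]
        rw [if_pos hp]
        simp only [List.length_cons, List.length_nil, Nat.zero_add, List.drop_succ_cons,
          List.drop_zero]
        rw [ih t _ h']
        simp
      · have hp : List.isPrefixOf [a] (c :: t) = false := by
          simp only [List.isPrefixOf, Bool.and_eq_false_iff]
          left
          simp [Ne.symm hc]
        rw [if_neg (by simp [hp])]
        rw [ih t _ h']
        simp [hc]

theorem replace_single (pep : String) (a : Char) :
    PySem.Str.replace pep (String.singleton a) "X"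
      = String.ofList (pep.toList.map (fun c => if c = a then 'X' else c)) := by
  unfold PySem.Str.replace PySem.Chars.replace
  have hX : ("X" : String).toList = ['X'] := by decide
  rw [String.toList_singleton, hX]
  rw [if_neg (by simp)]
  rw [replace_go_single a pep.toList.length pep.toList [] (Nat.le_refl _)]
  simp

-- A's helper equals B's character pass
theorem replace_uncommon_eq (p : String) : replace_uncommon_aas p = cleanPeptide p := by
  unfold replace_uncommon_aas cleanPeptide
  have key : ∀ (todo : List Char) (pep : String),
      todo.foldl
        (fun pep aa =>
          if PySem.Str.isIn (String.singleton aa) common_aa then pep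
          else PySem.Str.replace pep (String.singleton aa) "X")
        pep
      = String.ofList
          ((pep.toList).map (fun c => if !commonSet.contains c && todo.contains c then 'X' else c)) := by
    intro todo
    induction todo with
    | nil => intro pep; simp
    | cons a t ih =>
      intro pep
      rw [List.foldl_cons, inCommon_eq a]
      by_cases ha : commonSet.contains a = true
      · rw [if_pos ha, ih]
        congr 1
        apply List.map_congr_left
        intro c _
        by_cases hc : c = a
        · subst hc
          have hm : c ∈ commonSet := by simpa using ha
          simp [hm]
        · simp [hc]
      · rw [if_neg ha, replace_single pep a, ih]
        congr 1
        rw [String.toList_ofList, List.map_map]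
        apply List.map_congr_left
        intro c _
        by_cases hc : c = a
        · subst hc
          have hX : ('X' : Char) ∉ commonSet := by decide
          have hm : c ∉ commonSet := by simpa using ha
          simp [Function.comp, hX, hm]
        · simp [Function.comp, hc]
  rw [key]
  congr 1
  apply List.map_congr_left
  intro c hc
  have hmem : p.toList.contains c = true := by simpa using hc
  by_cases hm : c ∈ commonSet
  · simp [hm]
  · simp [hm, hc]

-- skipping inside a fold is folding over the filtered list
theorem foldl_skip_filter {α β : Type} (c : α → Prop) [DecidablePred c] (g : β → α → β) :
    ∀ (xs : List α) (d : β),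
      xs.foldl (fun d x => if c x then d else g d x) d
        = (xs.filter (fun x => !decide (c x))).foldl g d := by
  intro xs
  induction xs with
  | nil => intro d; simp
  | cons a t ih =>
    intro d
    by_cases ha : c a
    · simp [List.foldl_cons, ha, ih]
    · simp [List.foldl_cons, ha, ih]

-- ===== VERDICT (by name: the statement is the Claim_ definition above) =====
theorem create_netmhcpan_peptide_index_spec : Claim_equal_create_netmhcpan_peptide_index := by
  intro peptide_list _
  unfold Spec_create_netmhcpan_peptide_index
  unfold create_netmhcpan_peptide_index create_netmhcpan_peptide_index_alt
  rw [foldl_skip_filter (fun p => p.toList.length < 1)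
        (fun d p => d.insert p (replace_uncommon_aas p)) peptide_list PySem.Dict.empty]
  have hfil : (peptide_list.filter (fun p => !decide (p.toList.length < 1)))
      = peptide_list.filter (fun p => !p.toList.isEmpty) := by
    apply List.filter_congr
    intro p _
    cases p.toList <;> simp
  rw [hfil]
  simp only [replace_uncommon_eq]
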